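-- pv_equiv track=rewrite | github.com/Sherwin-WU/LSTM-DHHFSP | function.py | code_process
-- ===== SOURCE A (Python) =====
-- def code_process(singlechrome,fac_num): #将编码好的染色体分成工厂形式的染色体
--     lots_num = len(singlechrome[1])
--     fac_lots = []
--     for i in range(fac_num):
--         sig_chrome = []
--         k=0
--         for j in range(lots_num):
--             if singlechrome[1][j] == i:
--                 sig_chrome.append(int(singlechrome[0][j]))
--                 k +=1
--         fac_lots.append(sig_chrome)
--     return fac_lots
-- ===== SOURCE B (Python) =====
-- def code_process(singlechrome, fac_num):
--     fac_lots = [[] for _ in range(fac_num)]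
--     for job, fac in zip(singlechrome[0], singlechrome[1]):
--         if 0 <= fac < fac_num:
--             fac_lots[fac].append(int(job))
--     return fac_lots
-- ===== Notes on version B (the rewrite author's own statement) =====
-- stated objective: faster
-- what changed: Replaces the per-factory rescans of the assignment row with a single pass over zip(jobs, factories) that buckets each job directly into a preallocated per-factory list.
import Mathlib
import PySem

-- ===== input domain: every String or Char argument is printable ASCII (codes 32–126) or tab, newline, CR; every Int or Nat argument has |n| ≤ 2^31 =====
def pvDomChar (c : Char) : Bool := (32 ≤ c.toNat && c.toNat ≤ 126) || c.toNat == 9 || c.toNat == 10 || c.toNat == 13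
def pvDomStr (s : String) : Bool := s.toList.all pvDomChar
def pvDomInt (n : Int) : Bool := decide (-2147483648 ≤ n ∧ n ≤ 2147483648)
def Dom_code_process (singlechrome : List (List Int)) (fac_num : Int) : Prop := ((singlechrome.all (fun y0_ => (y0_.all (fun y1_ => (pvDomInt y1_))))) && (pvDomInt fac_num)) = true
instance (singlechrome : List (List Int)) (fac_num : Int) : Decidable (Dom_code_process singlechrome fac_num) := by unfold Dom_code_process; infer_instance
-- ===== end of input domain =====

-- B replaces A's per-factory rescans of the assignment row with one bucketing pass over
-- zip(jobs, factories) into preallocated per-factory lists (O(lots+fac) vs O(lots*fac)).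

-- ===== PORT A =====
-- Literal port of A; the dead counter `k` (written, never read) is omitted.
-- `singlechrome[1]` / `singlechrome[0]` are pyGet?; Pre_ guarantees they are `some`,
-- so `.getD []` never supplies the default on admitted inputs.
def code_process (singlechrome : List (List Int)) (fac_num : Int) : List (List Int) :=
  let c1 : List Int := (PySem.List.pyGet? singlechrome 1).getD []
  let c0 : List Int := (PySem.List.pyGet? singlechrome 0).getD []
  let lots_num : Int := (c1.length : Int)
  (PySem.List.pyRange 0 fac_num 1).foldl (fun fac_lots i =>
      let sig_chrome :=
        (PySem.List.pyRange 0 lots_num 1).foldl (fun sig_chrome j =>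
            if PySem.List.pyGetD c1 j 0 == i then
              sig_chrome ++ [PySem.List.pyGetD c0 j 0]
            else sig_chrome)
          ([] : List Int)
      fac_lots ++ [sig_chrome])
    []

-- ===== PORT B =====
def code_process_alt (singlechrome : List (List Int)) (fac_num : Int) : List (List Int) :=
  let c0 : List Int := (PySem.List.pyGet? singlechrome 0).getD []
  let c1 : List Int := (PySem.List.pyGet? singlechrome 1).getD []
  (c0.zip c1).foldl (fun fac_lots p =>
      if 0 ≤ p.2 ∧ p.2 < fac_num then fac_lots.modify p.2.toNat (· ++ [p.1]) else fac_lots)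
    (List.replicate fac_num.toNat ([] : List Int))

-- ===== PRECONDITION & SPEC =====
-- Pre_ excludes exactly the inputs on which A raises: fewer than two rows (IndexError on
-- singlechrome[1]/[0]), and assignment rows longer than the job row whose excess part
-- assigns some job to a real factory (IndexError on singlechrome[0][j]).
def Pre_code_process (singlechrome : List (List Int)) (fac_num : Int) : Prop :=
  2 ≤ singlechrome.length ∧
  ∀ x ∈ ((PySem.List.pyGet? singlechrome 1).getD []).drop
          ((PySem.List.pyGet? singlechrome 0).getD []).length,
      ¬(0 ≤ x ∧ x < fac_num)
instance (singlechrome : List (List Int)) (fac_num : Int) : Decidable (Pre_code_process singlechrome fac_num) := by unfold Pre_code_process; infer_instance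
def pvWitness_code_process : List (List Int) × Int := ([[1, 2, 3], [0, 1, 0]], 2)

def Spec_code_process (singlechrome : List (List Int)) (fac_num : Int) (out : List (List Int)) : Prop := out = code_process_alt singlechrome fac_num
instance (singlechrome : List (List Int)) (fac_num : Int) (out : List (List Int)) : Decidable (Spec_code_process singlechrome fac_num out) := by unfold Spec_code_process; infer_instance

-- ===== CLAIM (what is proved, stated in full; the proofs are below) =====
def Claim_equal_code_process : Prop := ∀ (singlechrome : List (List Int)) (fac_num : Int), Dom_code_process singlechrome fac_num → Pre_code_process singlechrome fac_num → Spec_code_process singlechrome fac_num (code_process singlechrome fac_num)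

-- ===== LEMMAS AND PROOFS =====

-- the bucket of factory n: jobs of the zipped rows assigned to n
def pvBucket (pairs : List (Int × Int)) (n : Nat) : List Int :=
  (pairs.filter (fun p => p.2 == (n : Int))).map Prod.fst

theorem pvA_filter (fac_num : Int) :
    ∀ (c1 c0 : List Int) (i : Int),
      (∀ x ∈ c1.drop c0.length, ¬(0 ≤ x ∧ x < fac_num)) → 0 ≤ i → i < fac_num →
      ((List.range c1.length).filter (fun k => c1.getD k 0 == i)).map (fun k => c0.getD k 0)
        = ((c0.zip c1).filter (fun p => p.2 == i)).map Prod.fst := by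
  intro c1
  induction c1 with
  | nil => intro c0 i _ _ _; simp
  | cons b t ih =>
    intro c0 i h h0 hf
    cases c0 with
    | nil =>
      simp only [List.zip_nil_left, List.filter_nil, List.map_nil]
      rw [List.filter_eq_nil_iff.2, List.map_nil]
      intro k hk
      simp only [List.mem_range] at hk
      simp only [List.getD_eq_getElem?_getD, List.getElem?_eq_getElem hk, Option.getD_some,
        beq_iff_eq]
      intro he
      refine h ((b :: t)[k]) (by simp) ?_
      rw [he]; exact ⟨h0, hf⟩
    | cons a s =>
      have h' : ∀ x ∈ t.drop s.length, ¬(0 ≤ x ∧ x < fac_num) := by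
        intro x hx; exact h x (by simpa using hx)
      have ihr := ih s i h' h0 hf
      simp only [List.length_cons, List.range_succ_eq_map, List.filter_cons,
        List.getD_cons_zero, List.filter_map, List.zip_cons_cons,
        Function.comp_def, List.getD_cons_succ]
      by_cases hb : b = i
      · simp only [hb, beq_self_eq_true, if_pos, List.map_cons, List.getD_cons_zero,
          List.map_map]
        refine congrArg (List.cons a) ?_
        rw [← ihr]
        simp only [Function.comp_def, List.getD_cons_succ]
      · simp only [beq_iff_eq, hb, if_false, List.map_map]
        rw [← ihr]
        simp only [Function.comp_def, List.getD_cons_succ]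

theorem pvGetD_range (l : List (List Int)) :
    (List.range l.length).map (fun n => l.getD n []) = l := by
  apply List.ext_getElem
  · simp
  · intro n h1 h2
    simp only [List.getElem_map, List.getElem_range]
    exact List.getD_eq_getElem l [] (by simpa using h1)

theorem pvB_foldl (fac_num : Int) :
    ∀ (pairs : List (Int × Int)) (acc : List (List Int)),
      acc.length = fac_num.toNat →
      (pairs.foldl (fun fac_lots p =>
          if 0 ≤ p.2 ∧ p.2 < fac_num then fac_lots.modify p.2.toNat (· ++ [p.1]) else fac_lots) acc)
        = (List.range acc.length).map (fun n => acc.getD n [] ++ pvBucket pairs n) := by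
  intro pairs
  induction pairs with
  | nil =>
    intro acc _
    simp only [List.foldl_nil, pvBucket, List.filter_nil, List.map_nil, List.append_nil]
    exact (pvGetD_range acc).symm
  | cons p rest ih =>
    intro acc hlen
    simp only [List.foldl_cons]
    by_cases hc : 0 ≤ p.2 ∧ p.2 < fac_num
    · rw [if_pos hc]
      have hlen' : (acc.modify p.2.toNat (· ++ [p.1])).length = fac_num.toNat := by
        rw [List.length_modify]; exact hlen
      rw [ih _ hlen', List.length_modify]
      apply List.map_congr_left
      intro n hn
      simp only [List.mem_range] at hn
      by_cases he : n = p.2.toNat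
      · subst he
        have hgd : (acc.modify p.2.toNat (· ++ [p.1])).getD p.2.toNat []
            = acc.getD p.2.toNat [] ++ [p.1] := by
          rw [List.getD_eq_getElem?_getD, List.getElem?_modify_eq, List.getD_eq_getElem?_getD]
          rw [List.getElem?_eq_getElem (by omega : p.2.toNat < acc.length)]
          rfl
        rw [hgd]
        have hpb : pvBucket (p :: rest) p.2.toNat = p.1 :: pvBucket rest p.2.toNat := by
          simp only [pvBucket, List.filter_cons]
          have : (p.2 == (p.2.toNat : Int)) = true := by
            simp only [beq_iff_eq]; omega
          rw [if_pos this]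
          rfl
        rw [hpb, List.append_assoc]
        rfl
      · have hgd : (acc.modify p.2.toNat (· ++ [p.1])).getD n []
            = acc.getD n [] := by
          rw [List.getD_eq_getElem?_getD, List.getElem?_modify_ne _ _ (fun h => he h.symm),
            List.getD_eq_getElem?_getD]
        rw [hgd]
        have hpb : pvBucket (p :: rest) n = pvBucket rest n := by
          simp only [pvBucket, List.filter_cons]
          have : (p.2 == (n : Int)) = false := by
            simp only [beq_eq_false_iff_ne, ne_eq]; intro hh; apply he; omega
          rw [this]
          simp
        rw [hpb]
    · rw [if_neg hc]
      rw [ih _ hlen]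
      apply List.map_congr_left
      intro n hn
      simp only [List.mem_range] at hn
      have hpb : pvBucket (p :: rest) n = pvBucket rest n := by
        simp only [pvBucket, List.filter_cons]
        have : (p.2 == (n : Int)) = false := by
          simp only [beq_eq_false_iff_ne, ne_eq]; intro hh
          apply hc; constructor <;> omega
        rw [this]
        simp
      rw [hpb]

-- ===== VERDICT (by name: the statement is the Claim_ definition above) =====
theorem code_process_spec : Claim_equal_code_process := by
  intro s fac _ hPre
  obtain ⟨-, hdrop⟩ := hPre
  show code_process s fac = code_process_alt s fac
  simp only [code_process, code_process_alt]
  rw [pvB_foldl fac _ _ (by simp)]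
  rw [PySem.List.pyRange_one 0 fac, List.foldl_map,
    PySem.List.foldl_append_singleton_eq_map]
  simp only [List.nil_append, Int.sub_zero, zero_add, List.length_replicate]
  apply List.map_congr_left
  intro k hk
  simp only [List.mem_range] at hk
  have hrep : (List.replicate fac.toNat ([] : List Int)).getD k [] = [] := by
    rw [List.getD_eq_getElem?_getD, List.getElem?_replicate, if_pos hk]
    rfl
  rw [hrep, List.nil_append]
  rw [PySem.List.pyRange_one 0 _, List.foldl_map]
  simp only [zero_add, Int.sub_zero, Int.toNat_natCast]
  rw [PySem.List.foldl_append_if]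
  simp only [PySem.List.pyGetD_natCast, List.nil_append]
  exact pvA_filter fac _ _ _ hdrop (by omega) (by omega)
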